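-- pv_equiv track=rewrite | github.com/sambennett04/Ent | Source/Groot.py | get_hour_range
-- ===== SOURCE A (Python) =====
-- def get_hour_range(startHour, endHour):
--
--     if startHour < 0 or startHour > 23:
--         raise Exception("Invalid input for cycle_start_time in SystemConfiguration.json. The cycle_start_time argument must be greater than or equal to one and less than or equal to 24.")
--
--     if endHour < 0 or endHour > 23:
--         raise Exception("Invalid input for cycle_end_time in SystemConfiguration.json. The cycle_end_time argument must be greater than or equal to one and less than or equal to 24.")
--
--     L = []
--     S = startHour
--     E = endHour
--
--     while S != E:
--         L.append(S)
--         S += 1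
--         if S > 23:
--             S = 0
--
--     return L
-- ===== SOURCE B (Python) =====
-- def get_hour_range(startHour, endHour):
--
--     if startHour < 0 or startHour > 23:
--         raise Exception("Invalid input for cycle_start_time in SystemConfiguration.json. The cycle_start_time argument must be greater than or equal to one and less than or equal to 24.")
--
--     if endHour < 0 or endHour > 23:
--         raise Exception("Invalid input for cycle_end_time in SystemConfiguration.json. The cycle_end_time argument must be greater than or equal to one and less than or equal to 24.")
--
--     day = list(range(24))
--     rotated = day[startHour:] + day[:startHour]
--     return rotated[:rotated.index(endHour)]
-- ===== Notes on version B (the rewrite author's own statement) =====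
-- stated objective: alternative
-- what changed: Instead of a mutating wrap-around cursor compared against endHour, B builds the static 24-hour table, rotates it to start at startHour by slicing, and returns the prefix up to the position of endHour found with list.index.
import Mathlib
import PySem

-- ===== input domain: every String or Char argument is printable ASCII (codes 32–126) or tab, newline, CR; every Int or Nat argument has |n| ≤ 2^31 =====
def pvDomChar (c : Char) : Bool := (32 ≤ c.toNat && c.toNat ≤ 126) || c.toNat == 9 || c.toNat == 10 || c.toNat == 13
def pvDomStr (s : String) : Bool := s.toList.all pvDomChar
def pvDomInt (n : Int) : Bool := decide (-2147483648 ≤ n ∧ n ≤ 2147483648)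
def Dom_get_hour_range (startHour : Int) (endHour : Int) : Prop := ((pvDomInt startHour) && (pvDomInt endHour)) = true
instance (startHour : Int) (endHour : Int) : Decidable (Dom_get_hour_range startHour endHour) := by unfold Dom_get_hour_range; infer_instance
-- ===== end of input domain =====

-- B replaces A's increment-and-wrap cursor loop with a static day table rotated by slicing,
-- cut at endHour's position found by list.index (objective: alternative).


-- ===== PORT A =====
-- the while loop of A: state (S, L); fuel only makes the recursion total — under
-- Pre_ the loop runs at most 24 times, so fuel 24 is never exhausted
def get_hour_range_loop (S E : Int) (L : List Int) : Nat → List Int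
  | 0 => L
  | fuel + 1 =>
    if S ≠ E then
      let L' := L ++ [S]
      let S' := S + 1
      get_hour_range_loop (if S' > 23 then 0 else S') E L' fuel
    else L

def get_hour_range (startHour : Int) (endHour : Int) : List Int :=
  -- the two raise-guards are excluded by Pre_get_hour_range
  get_hour_range_loop startHour endHour [] 24

-- ===== PORT B =====
def get_hour_range_alt (startHour : Int) (endHour : Int) : List Int :=
  -- day = list(range(24)); rotated = day[startHour:] + day[:startHour]
  let day := PySem.List.pyRange 0 24 1
  let rotated := PySem.List.slice day (some startHour) none ++ PySem.List.slice day none (some startHour)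
  -- rotated[:rotated.index(endHour)]; under Pre_ endHour ∈ rotated, so index never raises
  match PySem.List.index? rotated endHour with
  | some i => PySem.List.slice rotated none (some (i : Int))
  | none => []  -- unreachable under Pre_ (Python raises ValueError here)

-- ===== PRECONDITION & SPEC =====
-- Pre_ excludes exactly the inputs on which A raises its two validation Exceptions
def Pre_get_hour_range (startHour : Int) (endHour : Int) : Prop :=
  0 ≤ startHour ∧ startHour ≤ 23 ∧ 0 ≤ endHour ∧ endHour ≤ 23
instance (startHour : Int) (endHour : Int) : Decidable (Pre_get_hour_range startHour endHour) := by unfold Pre_get_hour_range; infer_instance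
def pvWitness_get_hour_range : Int × Int := (22, 3)

def Spec_get_hour_range (startHour : Int) (endHour : Int) (out : List Int) : Prop := out = get_hour_range_alt startHour endHour
instance (startHour : Int) (endHour : Int) (out : List Int) : Decidable (Spec_get_hour_range startHour endHour out) := by unfold Spec_get_hour_range; infer_instance

-- ===== CLAIM (what is proved, stated in full; the proofs are below) =====
def Claim_equal_get_hour_range : Prop := ∀ (startHour : Int) (endHour : Int), Dom_get_hour_range startHour endHour → Pre_get_hour_range startHour endHour → Spec_get_hour_range startHour endHour (get_hour_range startHour endHour)

-- ===== LEMMAS AND PROOFS =====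

-- ===== VERDICT (by name: the statement is the Claim_ definition above) =====
theorem get_hour_range_spec : Claim_equal_get_hour_range := by
  intro s e _ hpre
  unfold Spec_get_hour_range
  obtain ⟨h1, h2, h3, h4⟩ := hpre
  interval_cases s <;> interval_cases e <;> decide
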